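-- pv_equiv track=rewrite | github.com/fedlucchetti/ConnectomeViewer | window/plot_msmode.py | _normalize_label_token
-- ===== SOURCE A (Python) =====
-- def _normalize_label_token(text):
--     normalized = str(text or "").strip().lower()
--     for old, new in (
--         ("_", "-"),
--         (" ", "-"),
--         (".", "-"),
--         ("/", "-"),
--     ):
--         normalized = normalized.replace(old, new)
--     while "--" in normalized:
--         normalized = normalized.replace("--", "-")
--     return normalized
-- ===== SOURCE B (Python) =====
-- def _normalize_label_token(text):
--     s = str(text or "").strip().lower()
--     out = []
--     for ch in s:
--         if ch in ('_', ' ', '.', '/', '-'):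
--             if not out or out[-1] != '-':
--                 out.append('-')
--         else:
--             out.append(ch)
--     return "".join(out)
-- ===== Notes on version B (the rewrite author's own statement) =====
-- stated objective: simpler
-- what changed: Replaces A's four sequential str.replace passes plus the repeated dash-collapsing while loop with a single left-to-right pass that appends a dash for a separator character only when the last emitted character is not already a dash.
import Mathlib
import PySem

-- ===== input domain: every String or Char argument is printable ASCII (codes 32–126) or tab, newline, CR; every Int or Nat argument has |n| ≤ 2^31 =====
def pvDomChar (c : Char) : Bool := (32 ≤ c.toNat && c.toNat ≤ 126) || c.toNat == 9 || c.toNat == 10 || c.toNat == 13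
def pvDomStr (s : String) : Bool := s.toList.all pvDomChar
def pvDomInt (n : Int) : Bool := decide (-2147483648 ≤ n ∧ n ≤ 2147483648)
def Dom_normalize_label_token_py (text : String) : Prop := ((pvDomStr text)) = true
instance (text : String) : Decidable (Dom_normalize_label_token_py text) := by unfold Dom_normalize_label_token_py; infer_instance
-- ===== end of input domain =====

-- B fuses A's four replace passes and the '--' collapse loop into one traversal that
-- tracks only the last emitted character (objective: simpler, one pass instead of many).


-- ===== PORT A =====
-- A-side termination helpers: one pass of s.replace("--","-") as a structural function,
-- needed to show the while-loop's string strictly shrinks.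
def pvCP : List Char → List Char
  | '-' :: '-' :: t => '-' :: pvCP t
  | c :: t => c :: pvCP t
  | [] => []

theorem pvGo_dd : ∀ (fuel : Nat) (l acc : List Char), l.length ≤ fuel →
    PySem.Chars.replace.go ['-','-'] ['-'] fuel l acc = acc.reverse ++ pvCP l := by
  intro fuel
  induction fuel with
  | zero =>
    intro l acc h
    have : l = [] := List.eq_nil_of_length_eq_zero (Nat.le_zero.mp h)
    subst this; simp [PySem.Chars.replace.go, pvCP]
  | succ n ih =>
    intro l acc h
    match l with
    | [] => simp [PySem.Chars.replace.go, pvCP]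
    | c :: t =>
      simp only [PySem.Chars.replace.go]
      by_cases hc : c = '-'
      · subst hc
        match t with
        | [] =>
          simp [List.isPrefixOf, pvCP, ih [] _ (by simp), PySem.Chars.replace.go]
        | d :: u =>
          by_cases hd : d = '-'
          · subst hd
            have hpre : List.isPrefixOf ['-','-'] ('-' :: '-' :: u) = true := by
              simp [List.isPrefixOf]
            rw [if_pos hpre]
            have hu : u.length ≤ n := by simp at h; omega
            rw [ih _ _ (by simpa using hu)]
            simp [pvCP]
          · have hpre : List.isPrefixOf ['-','-'] ('-' :: d :: u) = false := by
              simp [List.isPrefixOf]; intro hdd; exact absurd hdd.symm hd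
            rw [if_neg (by simp [hpre])]
            have ht : (d :: u).length ≤ n := by simp at h ⊢; omega
            rw [ih _ _ ht]
            rcases u with _ | ⟨e, v⟩
            · simp [pvCP, hd]
            · by_cases he : e = '-' <;> simp [pvCP, hd, he]
      · have hpre : List.isPrefixOf ['-','-'] (c :: t) = false := by
          simp [List.isPrefixOf]; intro hcd; exact absurd hcd.symm hc
        rw [if_neg (by simp [hpre])]
        have ht : t.length ≤ n := by simp at h; omega
        rw [ih _ _ ht]
        rcases t with _ | ⟨d, u⟩
        · simp [pvCP, hc]
        · by_cases hd : d = '-' <;>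
          · rcases u with _ | ⟨e, v⟩ <;> simp [pvCP, hc, hd]

theorem pvReplace_dd (l : List Char) :
    PySem.Chars.replace l ['-','-'] ['-'] = pvCP l := by
  show PySem.Chars.replace l ['-','-'] ['-'] = pvCP l
  rw [PySem.Chars.replace]
  simp only [List.isEmpty, if_neg]
  exact pvGo_dd l.length l [] (le_refl _)

theorem pvCP_len_le (l : List Char) : (pvCP l).length ≤ l.length := by
  induction l using pvCP.induct with
  | case1 t ih => simp [pvCP]; omega
  | case2 c t h ih =>
    rcases t with _ | ⟨d, u⟩
    · simp [pvCP]
    · by_cases hc : c = '-' <;> by_cases hd : d = '-' <;>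
        simp_all [pvCP] <;> try omega
  | case3 => simp [pvCP]

theorem pvCP_len_lt (l : List Char) (h : ['-','-'] <:+: l) :
    (pvCP l).length < l.length := by
  induction l using pvCP.induct with
  | case1 t ih =>
    have := pvCP_len_le t
    simp [pvCP]; omega
  | case2 c t hne ih =>
    have ht : ['-','-'] <:+: t := by
      rcases (List.infix_cons_iff.mp h) with hp | hi
      · exfalso
        rcases hp with ⟨r, hr⟩
        injection hr with h1 h2
        exact hne r h1.symm h2.symm
      · exact hi
    rcases t with _ | ⟨d, u⟩
    · simp at ht
    · have := ih ht
      by_cases hc : c = '-' <;> by_cases hd : d = '-' <;>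
        simp_all [pvCP] <;> try omega
  | case3 =>
    exfalso; rw [List.infix_iff_prefix_suffix] at h
    rcases h with ⟨t, hp, hs⟩
    have := List.eq_nil_of_suffix_nil hs
    subst this; simp at hp

-- while "--" in normalized: normalized = normalized.replace("--", "-")
def pvCollapse (s : String) : String :=
  if h : PySem.Str.isIn "--" s = true then
    pvCollapse (PySem.Str.replace s "--" "-")
  else s
termination_by s.toList.length
decreasing_by
  have hinf : ['-','-'] <:+: s.toList := by
    have := (PySem.Str.isIn_iff_infix (sub := "--") (s := s)).mp h
    simpa using this
  have : (PySem.Str.replace s "--" "-").toList = pvCP s.toList := by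
    rw [PySem.Str.toList_replace]
    exact pvReplace_dd s.toList
  rw [this]
  exact pvCP_len_lt s.toList hinf

def normalize_label_token_py (text : String) : String :=
  let normalized := PySem.Str.lower (PySem.Str.strip (if text = "" then "" else text))
  let normalized := [("_","-"), (" ","-"), (".","-"), ("/","-")].foldl
      (fun n (p : String × String) => PySem.Str.replace n p.1 p.2) normalized
  pvCollapse normalized

-- ===== PORT B =====
def normalize_label_token_py_alt (text : String) : String :=
  let s := PySem.Str.lower (PySem.Str.strip (if text = "" then "" else text))
  -- the single pass: out is the accumulated char list; "".join(out) is String.mk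
  String.mk (s.toList.foldl
    (fun out ch =>
      if ch ∈ ['_', ' ', '.', '/', '-'] then
        (if out = [] ∨ PySem.List.pyGet? out (-1) ≠ some '-' then out ++ ['-'] else out)
      else out ++ [ch]) [])

-- ===== PRECONDITION & SPEC =====
def Spec_normalize_label_token_py (text : String) (out : String) : Prop := out = normalize_label_token_py_alt text
instance (text : String) (out : String) : Decidable (Spec_normalize_label_token_py text out) := by unfold Spec_normalize_label_token_py; infer_instance

-- ===== CLAIM (what is proved, stated in full; the proofs are below) =====
def Claim_equal_normalize_label_token_py : Prop := ∀ (text : String), Dom_normalize_label_token_py text → Spec_normalize_label_token_py text (normalize_label_token_py text)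

-- ===== LEMMAS AND PROOFS =====

theorem pvMk_toList (l : List Char) : (String.mk l).toList = l :=
  Eq.symm ((fun {l} {s} => String.ofList_eq.mp) rfl)

-- dash-squeeze, reading left to right; b = "the previously emitted char was '-'"
def pvDsq : Bool → List Char → List Char
  | _, [] => []
  | b, c :: t =>
    if c = '-' then (if b then pvDsq true t else '-' :: pvDsq true t)
    else c :: pvDsq false t

theorem pvDsq_cp (l : List Char) : ∀ b, pvDsq b (pvCP l) = pvDsq b l := by
  induction l using pvCP.induct with
  | case1 t ih =>
    intro b
    simp only [pvCP, pvDsq, if_pos rfl]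
    cases b <;> simp [ih]
  | case2 c t hne ih =>
    intro b
    simp only [pvCP, pvDsq]
    by_cases hc : c = '-' <;> cases b <;> simp [hc, ih]
  | case3 => intro b; simp [pvCP]

theorem pvDsq_id (l : List Char) (h : ¬ ['-','-'] <:+: l) :
    pvDsq false l = l ∧ (l.head? ≠ some '-' → pvDsq true l = l) := by
  induction l with
  | nil => simp [pvDsq]
  | cons c t ih =>
    have ht : ¬ ['-','-'] <:+: t := fun hi => h (List.infix_cons_iff.mpr (Or.inr hi))
    have iht := ih ht
    by_cases hc : c = '-'
    · subst hc
      have hhd : t.head? ≠ some '-' := by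
        intro hh
        rcases t with _ | ⟨d, u⟩
        · simp at hh
        · simp at hh; subst hh
          exact h (List.infix_cons_iff.mpr (Or.inl ⟨u, rfl⟩))
      constructor
      · simp [pvDsq, iht.2 hhd]
      · intro hh; simp at hh
    · constructor
      · simp [pvDsq, hc, iht.1]
      · intro _; simp [pvDsq, hc, iht.1]

theorem pvCollapse_toList (s : String) :
    (pvCollapse s).toList = pvDsq false s.toList := by
  by_cases h : PySem.Str.isIn "--" s = true
  · rw [pvCollapse]; rw [dif_pos h]
    have hinf : ['-','-'] <:+: s.toList := by
      have := (PySem.Str.isIn_iff_infix (sub := "--") (s := s)).mp h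
      simpa using this
    have hrep : (PySem.Str.replace s "--" "-").toList = pvCP s.toList := by
      rw [PySem.Str.toList_replace]; exact pvReplace_dd s.toList
    rw [pvCollapse_toList (PySem.Str.replace s "--" "-"), hrep, pvDsq_cp]
  · rw [pvCollapse]; rw [dif_neg h]
    have hni : ¬ ['-','-'] <:+: s.toList := by
      intro hi
      apply h
      apply (PySem.Str.isIn_iff_infix (sub := "--") (s := s)).mpr
      simpa using hi
    exact (pvDsq_id s.toList hni).1.symm
termination_by s.toList.length
decreasing_by
  rw [hrep]
  exact pvCP_len_lt s.toList hinf

-- single-character replace is a map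
theorem pvGo_single (a b : Char) : ∀ (fuel : Nat) (l acc : List Char), l.length ≤ fuel →
    PySem.Chars.replace.go [a] [b] fuel l acc =
      acc.reverse ++ l.map (fun c => if c = a then b else c) := by
  intro fuel
  induction fuel with
  | zero =>
    intro l acc h
    have : l = [] := List.eq_nil_of_length_eq_zero (Nat.le_zero.mp h)
    subst this; simp [PySem.Chars.replace.go]
  | succ n ih =>
    intro l acc h
    match l with
    | [] => simp [PySem.Chars.replace.go]
    | c :: t =>
      simp only [PySem.Chars.replace.go]
      have ht : t.length ≤ n := by simp at h; omega
      by_cases hc : c = a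
      · subst hc
        have hpre : List.isPrefixOf [c] (c :: t) = true := by simp [List.isPrefixOf]
        rw [if_pos hpre]
        simp only [List.length_nil, List.drop_zero, List.length_singleton,
          List.drop_succ_cons]
        rw [ih t _ ht]
        simp
      · have hpre : List.isPrefixOf [a] (c :: t) = false := by
          simp [List.isPrefixOf]; intro hca; exact absurd hca.symm hc
        rw [if_neg (by simp [hpre])]
        rw [ih t _ ht]
        simp [hc]

theorem pvReplace_single (a b : Char) (l : List Char) :
    PySem.Chars.replace l [a] [b] = l.map (fun c => if c = a then b else c) := by
  rw [PySem.Chars.replace]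
  simp only [List.isEmpty, if_neg]
  exact pvGo_single a b l.length l [] (le_refl _)

-- the composite of the four single-char substitutions
def pvF (c : Char) : Char := if c ∈ (['_', ' ', '.', '/', '-'] : List Char) then '-' else c

-- B's left-to-right pass, with the raw separator test
def pvSqL : Bool → List Char → List Char
  | _, [] => []
  | b, c :: t =>
    if c ∈ (['_', ' ', '.', '/', '-'] : List Char) then
      (if b then pvSqL true t else '-' :: pvSqL true t)
    else c :: pvSqL false t

theorem pvSqL_eq_dsq_map (l : List Char) : ∀ b, pvSqL b l = pvDsq b (l.map pvF) := by
  induction l with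
  | nil => intro b; simp [pvSqL, pvDsq]
  | cons c t ih =>
    intro b
    by_cases hc : c ∈ (['_', ' ', '.', '/', '-'] : List Char)
    · have hF : pvF c = '-' := by simp [pvF, hc]
      simp only [pvSqL, pvDsq, List.map_cons, hF, if_pos hc, if_pos rfl]
      cases b <;> simp [ih]
    · have hF : pvF c = c := by simp [pvF, hc]
      have hcd : c ≠ '-' := by intro h; subst h; simp at hc
      simp [pvSqL, pvDsq, hF, hc, hcd, ih]

theorem pvGetLast_neg_one (l : List Char) :
    PySem.List.pyGet? l (-1) = l.getLast? := by
  rcases l with _ | ⟨c, t⟩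
  · simp [PySem.List.pyGet?, PySem.List.pyIdx?]
  · simp [PySem.List.pyGet?, PySem.List.pyIdx?, List.getLast?_eq_getElem?]

theorem pvFold_eq (l : List Char) : ∀ (out : List Char),
    l.foldl (fun out ch =>
      if ch ∈ (['_', ' ', '.', '/', '-'] : List Char) then
        (if out = [] ∨ PySem.List.pyGet? out (-1) ≠ some '-' then out ++ ['-'] else out)
      else out ++ [ch]) out
    = out ++ pvSqL (out.getLast? == some '-') l := by
  induction l with
  | nil => intro out; simp [pvSqL]
  | cons c t ih =>
    intro out
    simp only [List.foldl_cons]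
    by_cases hc : c ∈ (['_', ' ', '.', '/', '-'] : List Char)
    · by_cases hb : out.getLast? = some '-'
      · have hne : out ≠ [] := by intro h; subst h; simp at hb
        rw [if_pos hc, if_neg (by simp [hne, pvGetLast_neg_one, hb])]
        rw [ih out]
        simp [pvSqL, hc, hb]
      · rw [if_pos hc, if_pos (by rw [pvGetLast_neg_one]; right; simp [hb])]
        rw [ih (out ++ ['-'])]
        simp [pvSqL, hc, hb]
    · rw [if_neg hc, ih (out ++ [c])]
      have hcd : (c == '-') = false := by
        simp; intro h; subst h; simp at hc
      simp [pvSqL, hc, hcd]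

-- ===== VERDICT (by name: the statement is the Claim_ definition above) =====
set_option maxHeartbeats 1000000 in
theorem normalize_label_token_py_spec : Claim_equal_normalize_label_token_py := by
  intro text _
  unfold Spec_normalize_label_token_py normalize_label_token_py normalize_label_token_py_alt
  apply String.ext   -- compare via toList
  set s := PySem.Str.lower (PySem.Str.strip (if text = "" then "" else text)) with hs
  simp only [List.foldl_cons, List.foldl_nil]
  rw [pvCollapse_toList]
  simp only [PySem.Str.toList_replace]
  have t1 : ("_" : String).toList = ['_'] := rfl
  have t2 : (" " : String).toList = [' '] := rfl
  have t3 : ("." : String).toList = ['.'] := rfl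
  have t4 : ("/" : String).toList = ['/'] := rfl
  have t5 : ("-" : String).toList = ['-'] := rfl
  rw [t1, t2, t3, t4, t5]
  rw [pvReplace_single, pvReplace_single, pvReplace_single, pvReplace_single]
  rw [pvFold_eq s.toList []]
  simp only [List.nil_append, List.getLast?_nil]
  rw [pvSqL_eq_dsq_map]
  have hb : ((none : Option Char) == some '-') = false := rfl
  rw [hb]
  have hmap : ((((s.toList.map (fun c => if c = '_' then '-' else c)).map
        (fun c => if c = ' ' then '-' else c)).map
        (fun c => if c = '.' then '-' else c)).map
        (fun c => if c = '/' then '-' else c)) = s.toList.map pvF := by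
    simp only [List.map_map]
    apply List.map_congr_left
    intro c _
    simp only [Function.comp]
    by_cases h1 : c = '_' <;> by_cases h2 : c = ' ' <;> by_cases h3 : c = '.' <;>
      by_cases h4 : c = '/' <;> simp_all [pvF]
  rw [hmap]
  exact (pvMk_toList _).symm
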